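-- pv_equiv track=rewrite | github.com/datahub-project/datahub | metadata-ingestion/src/datahub/ingestion/source/snowflake/snowflake_semantic_parser.py | _is_expression
-- ===== SOURCE A (Python) =====
-- def _is_expression(text: str) -> bool:
--     """Check if text is an expression (contains functions, operators, etc.)."""
--     expr_indicators = [
--         "(",
--         ")",
--         "+",
--         "-",
--         "*",
--         "/",
--         "SUM",
--         "AVG",
--         "COUNT",
--         "MAX",
--         "MIN",
--     ]
--     return any(indicator in text.upper() for indicator in expr_indicators)
-- ===== SOURCE B (Python) =====
-- def _is_expression(text: str) -> bool:
--     """Check if text is an expression (contains functions, operators, etc.)."""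
--     up = text.upper()
--     ops = frozenset("()+-*/")
--     kws = ("SUM", "AVG", "COUNT", "MAX", "MIN")
--     for i, ch in enumerate(up):
--         if ch in ops:
--             return True
--         if any(up.startswith(k, i) for k in kws):
--             return True
--     return False
-- ===== Notes on version B (the rewrite author's own statement) =====
-- stated objective: alternative
-- what changed: Instead of running one full substring scan over text.upper() per indicator (any(ind in up for ind in ...)), B makes a single left-to-right pass over the uppercased text, checking at each position for an operator character or a keyword starting there, returning early on the first hit.
import Mathlib
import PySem

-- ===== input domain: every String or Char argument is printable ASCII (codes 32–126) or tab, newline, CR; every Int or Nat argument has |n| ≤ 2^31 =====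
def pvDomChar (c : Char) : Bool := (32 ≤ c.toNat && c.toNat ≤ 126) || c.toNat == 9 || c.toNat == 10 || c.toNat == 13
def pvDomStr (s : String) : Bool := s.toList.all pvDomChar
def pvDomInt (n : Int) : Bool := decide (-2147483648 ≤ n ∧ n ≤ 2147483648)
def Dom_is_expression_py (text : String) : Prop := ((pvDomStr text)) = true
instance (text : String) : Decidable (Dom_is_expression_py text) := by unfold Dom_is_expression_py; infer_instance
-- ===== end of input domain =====

-- B replaces A's eleven independent substring scans by one left-to-right scan that checks
-- each position for an operator character or a keyword starting there (objective: alternative).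

-- ===== PORT A =====
def is_expression_py (text : String) : Bool :=
  (["(", ")", "+", "-", "*", "/", "SUM", "AVG", "COUNT", "MAX", "MIN"]).any
    (fun indicator => PySem.Str.isIn indicator (PySem.Str.upper text))

-- ===== PORT B =====
def pvOps : List Char := ['(', ')', '+', '-', '*', '/']
def pvKws : List (List Char) :=
  [['S','U','M'], ['A','V','G'], ['C','O','U','N','T'], ['M','A','X'], ['M','I','N']]

def pvScan : List Char → Bool
  | [] => false
  | c :: rest =>
    if pvOps.contains c then true
    else if pvKws.any (fun k => PySem.Chars.startswith (c :: rest) k) then true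
    else pvScan rest

def is_expression_py_alt (text : String) : Bool :=
  pvScan (PySem.Str.upper text).toList

-- ===== PRECONDITION & SPEC =====
def Spec_is_expression_py (text : String) (out : Bool) : Prop := out = is_expression_py_alt text
instance (text : String) (out : Bool) : Decidable (Spec_is_expression_py text out) := by unfold Spec_is_expression_py; infer_instance

-- ===== CLAIM (what is proved, stated in full; the proofs are below) =====
def Claim_equal_is_expression_py : Prop := ∀ (text : String), Dom_is_expression_py text → Spec_is_expression_py text (is_expression_py text)

-- ===== LEMMAS AND PROOFS =====

-- a hit at some position of c :: rest is a hit at position 0 or a hit inside rest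
theorem pv_exists_drop_cons (P : List Char → Prop) (c : Char) (rest : List Char) :
    (∃ j : Nat, P ((c :: rest).drop j)) ↔ P (c :: rest) ∨ (∃ j : Nat, P (rest.drop j)) := by
  constructor
  · rintro ⟨j, hj⟩
    cases j with
    | zero => exact Or.inl hj
    | succ j => exact Or.inr ⟨j, hj⟩
  · rintro (h | ⟨j, hj⟩)
    · exact ⟨0, h⟩
    · exact ⟨j + 1, hj⟩

-- characterisation of B's single scan: it hits iff some position carries an operator or keyword
theorem pvScan_iff (s : List Char) :
    pvScan s = true ↔
      ∃ j : Nat, (∃ c ∈ pvOps, [c] <+: s.drop j) ∨ (∃ k ∈ pvKws, k <+: s.drop j) := by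
  induction s with
  | nil =>
    simp [pvScan, pvOps, pvKws]
  | cons c rest ih =>
    rw [pv_exists_drop_cons (fun t => (∃ c ∈ pvOps, [c] <+: t) ∨ ∃ k ∈ pvKws, k <+: t)]
    rw [pvScan]
    split_ifs with hop hkw
    · simp only [true_iff]
      refine Or.inl (Or.inl ⟨c, ?_, List.cons_prefix_cons.mpr ⟨rfl, List.nil_prefix⟩⟩)
      simpa using hop
    · simp only [true_iff]
      refine Or.inl (Or.inr ?_)
      rcases List.any_eq_true.mp hkw with ⟨k, hk, hks⟩
      exact ⟨k, hk, (PySem.Chars.startswith_iff _ _).mp hks⟩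
    · rw [ih]
      constructor
      · exact Or.inr
      · rintro (h | h)
        · exfalso
          rcases h with ⟨c', hc', hp⟩ | ⟨k, hk, hp⟩
          · rcases List.cons_prefix_cons.mp hp with ⟨rfl, -⟩
            exact hop (by simpa using hc')
          · exact hkw (List.any_eq_true.mpr ⟨k, hk, (PySem.Chars.startswith_iff _ _).mpr hp⟩)
        · exact h

-- ===== VERDICT (by name: the statement is the Claim_ definition above) =====
theorem is_expression_py_spec : Claim_equal_is_expression_py := by
  intro text _
  show is_expression_py text = is_expression_py_alt text
  rw [Bool.eq_iff_iff]
  rw [is_expression_py_alt, pvScan_iff]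
  rw [is_expression_py]
  simp only [List.any_eq_true, List.mem_cons]
  constructor
  · rintro ⟨ind, hind, hin⟩
    have hin' : PySem.Chars.isIn ind.toList (PySem.Str.upper text).toList = true := by
      simpa [PySem.Str.isIn_eq] using hin
    rcases (PySem.Chars.exists_prefix_drop_iff_isIn _ _).mpr hin' with ⟨j, hj⟩
    refine ⟨j, ?_⟩
    rcases hind with rfl|rfl|rfl|rfl|rfl|rfl|rfl|rfl|rfl|rfl|rfl|h
    · exact Or.inl ⟨'(', by simp [pvOps], hj⟩
    · exact Or.inl ⟨')', by simp [pvOps], hj⟩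
    · exact Or.inl ⟨'+', by simp [pvOps], hj⟩
    · exact Or.inl ⟨'-', by simp [pvOps], hj⟩
    · exact Or.inl ⟨'*', by simp [pvOps], hj⟩
    · exact Or.inl ⟨'/', by simp [pvOps], hj⟩
    · exact Or.inr ⟨['S','U','M'], by simp [pvKws], hj⟩
    · exact Or.inr ⟨['A','V','G'], by simp [pvKws], hj⟩
    · exact Or.inr ⟨['C','O','U','N','T'], by simp [pvKws], hj⟩
    · exact Or.inr ⟨['M','A','X'], by simp [pvKws], hj⟩
    · exact Or.inr ⟨['M','I','N'], by simp [pvKws], hj⟩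
    · exact absurd h (List.not_mem_nil)
  · rintro ⟨j, h⟩
    have toIn : ∀ (ind : String), ind.toList <+: (PySem.Str.upper text).toList.drop j →
        PySem.Str.isIn ind (PySem.Str.upper text) = true := by
      intro ind hp
      have : PySem.Chars.isIn ind.toList (PySem.Str.upper text).toList = true :=
        (PySem.Chars.exists_prefix_drop_iff_isIn _ _).mp ⟨j, hp⟩
      simpa [PySem.Str.isIn_eq] using this
    rcases h with ⟨c, hc, hp⟩ | ⟨k, hk, hp⟩
    · fin_cases hc
      · exact ⟨"(", by simp, toIn "(" hp⟩
      · exact ⟨")", by simp, toIn ")" hp⟩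
      · exact ⟨"+", by simp, toIn "+" hp⟩
      · exact ⟨"-", by simp, toIn "-" hp⟩
      · exact ⟨"*", by simp, toIn "*" hp⟩
      · exact ⟨"/", by simp, toIn "/" hp⟩
    · fin_cases hk
      · exact ⟨"SUM", by simp, toIn "SUM" hp⟩
      · exact ⟨"AVG", by simp, toIn "AVG" hp⟩
      · exact ⟨"COUNT", by simp, toIn "COUNT" hp⟩
      · exact ⟨"MAX", by simp, toIn "MAX" hp⟩
      · exact ⟨"MIN", by simp, toIn "MIN" hp⟩
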